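-- pv_equiv track=rewrite | github.com/fedotov2a/TSU | Crypto/7/crypto_func.py | get_blocks_from_data
-- ===== SOURCE A (Python) =====
-- def get_blocks_from_data(data, block_size):
--     block_ints = []
--     for blockStart in range(0, len(data), block_size):
--         block_int = 0
--         for i in range(blockStart, min(blockStart + block_size, len(data))):
--             block_int += data[i] * (256 ** (i % block_size))
--         block_ints.append(block_int)
--     return block_ints
-- ===== SOURCE B (Python) =====
-- def get_blocks_from_data(data, block_size):
--     def horner(block):
--         value = 0
--         for b in reversed(block):
--             value = value * 256 + b
--         return value
--     return [horner(data[i:i + block_size]) for i in range(0, len(data), block_size)]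
-- ===== Notes on version B (the rewrite author's own statement) =====
-- stated objective: idiomatic
-- what changed: B slices each block and folds it back-to-front with Horner's rule (value = value*256 + byte), replacing A's per-element accumulation of data[i] * 256**(i % block_size) power terms.
import Mathlib
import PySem

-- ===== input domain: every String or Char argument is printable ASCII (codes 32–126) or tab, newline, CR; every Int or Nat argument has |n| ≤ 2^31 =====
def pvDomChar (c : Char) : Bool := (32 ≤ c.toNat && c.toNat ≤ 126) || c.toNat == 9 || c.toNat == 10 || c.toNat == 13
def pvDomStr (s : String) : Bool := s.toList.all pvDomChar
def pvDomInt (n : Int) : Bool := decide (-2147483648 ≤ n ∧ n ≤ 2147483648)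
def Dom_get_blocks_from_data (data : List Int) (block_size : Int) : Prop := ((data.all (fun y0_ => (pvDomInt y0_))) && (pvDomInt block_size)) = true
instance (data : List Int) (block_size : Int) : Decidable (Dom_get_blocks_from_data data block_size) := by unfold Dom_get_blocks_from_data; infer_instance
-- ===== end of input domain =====

-- B replaces A's positional power-of-256 accumulation by per-block slicing plus a
-- back-to-front Horner fold; equivalence (return value only, no mutation involved).

-- ===== PORT A =====
-- exponent: Python's 256 ** (i % block_size); whenever the inner loop runs, block_size > 0,
-- so i % block_size ≥ 0 and .toNat is exact there.
def get_blocks_from_data (data : List Int) (block_size : Int) : List Int :=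
  (PySem.List.pyRange 0 (data.length : Int) block_size).foldl
    (fun block_ints blockStart =>
      block_ints ++
        [(PySem.List.pyRange blockStart (min (blockStart + block_size) (data.length : Int)) 1).foldl
          (fun block_int i =>
            block_int + PySem.List.pyGetD data i 0 * 256 ^ (PySem.Int.mod i block_size).toNat)
          0])
    []

-- ===== PORT B =====
def pvHorner (block : List Int) : Int :=
  block.reverse.foldl (fun value b => value * 256 + b) 0

def get_blocks_from_data_alt (data : List Int) (block_size : Int) : List Int :=
  (PySem.List.pyRange 0 (data.length : Int) block_size).map
    (fun i => pvHorner (PySem.List.slice data (some i) (some (i + block_size))))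

-- ===== PRECONDITION & SPEC =====
-- block_size = 0 makes range(0, len(data), 0) raise ValueError in Python (in A and in B alike).
def Pre_get_blocks_from_data (data : List Int) (block_size : Int) : Prop := block_size ≠ 0
instance (data : List Int) (block_size : Int) : Decidable (Pre_get_blocks_from_data data block_size) := by unfold Pre_get_blocks_from_data; infer_instance
def pvWitness_get_blocks_from_data : List Int × Int := ([1, 2, 3, 4, 5], 2)

def Spec_get_blocks_from_data (data : List Int) (block_size : Int) (out : List Int) : Prop := out = get_blocks_from_data_alt data block_size
instance (data : List Int) (block_size : Int) (out : List Int) : Decidable (Spec_get_blocks_from_data data block_size out) := by unfold Spec_get_blocks_from_data; infer_instance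

-- ===== CLAIM (what is proved, stated in full; the proofs are below) =====
def Claim_equal_get_blocks_from_data : Prop := ∀ (data : List Int) (block_size : Int), Dom_get_blocks_from_data data block_size → Pre_get_blocks_from_data data block_size → Spec_get_blocks_from_data data block_size (get_blocks_from_data data block_size)

-- ===== LEMMAS AND PROOFS =====

-- Horner over the reversed block is the base-256 positional sum.
theorem pvHorner_eq_sum (bl : List Int) :
    pvHorner bl =
      ((List.range bl.length).map (fun k => bl.getD k 0 * 256 ^ k)).sum := by
  unfold pvHorner
  rw [List.foldl_reverse]
  induction bl with
  | nil => simp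
  | cons x t ih =>
    simp only [List.foldr_cons, List.length_cons, List.range_succ_eq_map,
      List.map_cons, List.map_map, List.sum_cons, ih]
    have : ((List.range t.length).map ((fun k => (x :: t).getD k 0 * 256 ^ k) ∘ (· + 1))).sum
        = 256 * ((List.range t.length).map (fun k => t.getD k 0 * 256 ^ k)).sum := by
      rw [← List.sum_map_mul_left]
      apply congrArg
      apply List.map_congr_left
      intro k _
      simp [Function.comp, pow_succ]
      ring
    rw [this]
    simp
    ring

theorem get_blocks_from_data_spec : Claim_equal_get_blocks_from_data := by
  intro data block_size _ hbs
  unfold Spec_get_blocks_from_data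
  unfold Pre_get_blocks_from_data at hbs
  rcases lt_or_gt_of_ne hbs with hneg | hpos
  · -- negative step: range(0, len, bs) is empty on both sides
    have h : PySem.List.pyRange 0 (data.length : Int) block_size = [] := by
      simp only [PySem.List.pyRange]
      rw [if_neg hbs, if_neg (by omega : ¬ (0:Int) < block_size),
        if_neg (by omega : ¬ (data.length : Int) < 0)]
      simp
    simp [get_blocks_from_data, get_blocks_from_data_alt, h]
  · -- positive step
    unfold get_blocks_from_data get_blocks_from_data_alt
    rw [PySem.List.foldl_append_singleton_eq_map, List.nil_append]
    apply List.map_congr_left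
    intro s hs
    rw [PySem.List.mem_pyRange_iff_of_pos hpos] at hs
    obtain ⟨hs0, hsn, q, hq⟩ := hs
    rw [sub_zero] at hq
    -- block slice as drop/take
    set e : Int := min (s + block_size) (data.length : Int) with he
    have hse : s < e := by omega
    have hen : e ≤ (data.length : Int) := by omega
    -- A side: rewrite the fold into a sum over List.range m
    rw [PySem.List.foldl_add, zero_add, PySem.List.pyRange_one]
    have hm : ((e - s).toNat : Int) = e - s := by omega
    set m : Nat := (e - s).toNat with hmdef
    -- B side: slice = take m (drop s.toNat data)
    have hslice : PySem.List.slice data (some s) (some (s + block_size))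
        = List.take ((s + block_size).toNat - s.toNat) (List.drop s.toNat data) := by
      exact PySem.List.slice_toNat data hs0 (by omega)
    rw [hslice, pvHorner_eq_sum]
    have hlen : (List.take ((s + block_size).toNat - s.toNat) (List.drop s.toNat data)).length = m := by
      rw [List.length_take, List.length_drop]
      omega
    rw [hlen, List.map_map]
    apply congrArg
    apply List.map_congr_left
    intro k hk
    rw [List.mem_range] at hk
    have hkb : (k : Int) < block_size := by omega
    have hkn : s + (k : Int) < (data.length : Int) := by omega
    -- exponent: (s + k) % block_size = k
    have hmod : PySem.Int.mod (s + (k : Int)) block_size = (k : Int) := by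
      show (s + (k : Int)).fmod block_size = (k : Int)
      rw [Int.fmod_eq_emod, if_pos (Or.inl (by omega : (0:Int) ≤ block_size)), add_zero, hq,
        Int.add_comm, Int.add_mul_emod_self_left]
      exact Int.emod_eq_of_lt (by omega) hkb
    -- element: pyGetD data (s+k) 0 = data[s.toNat + k]
    have hget : PySem.List.pyGetD data (s + (k : Int)) 0
        = data[s.toNat + k]'(by omega) := by
      rw [PySem.List.pyGetD_eq_getElem data 0 (by omega) hkn]
      congr 1
      omega
    have hget' :
        (List.take ((s + block_size).toNat - s.toNat) (List.drop s.toNat data)).getD k 0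
          = data[s.toNat + k]'(by omega) := by
      have hk' : k < ((s + block_size).toNat - s.toNat) ⊓ (data.length - s.toNat) := by omega
      rw [List.getD_eq_getElem _ _ (by simpa [List.length_take, List.length_drop] using hk')]
      simp [List.getElem_take, List.getElem_drop]
    simp only [Function.comp]
    rw [hmod, hget, hget']
    norm_num
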